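-- pv_equiv track=rewrite | github.com/Snail3D/Mesh-Memory | mesh_master/games/game_manager.py | _yahtzee_parse_category
-- ===== SOURCE A (Python) =====
-- from typing import Any, Callable, Deque, Dict, List, Optional, Set, Tuple
--
-- YAHTZEE_CATEGORIES = [
--     "ones",
--     "twos",
--     "threes",
--     "fours",
--     "fives",
--     "sixes",
--     "three_kind",
--     "four_kind",
--     "full_house",
--     "small_straight",
--     "large_straight",
--     "chance",
--     "yahtzee",
-- ]
--
-- YAHTZEE_LABELS = {
--     "ones": "Ones",
--     "twos": "Twos",
--     "threes": "Threes",
--     "fours": "Fours",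
--     "fives": "Fives",
--     "sixes": "Sixes",
--     "three_kind": "Three of a Kind",
--     "four_kind": "Four of a Kind",
--     "full_house": "Full House",
--     "small_straight": "Small Straight",
--     "large_straight": "Large Straight",
--     "chance": "Chance",
--     "yahtzee": "Yahtzee",
-- }
--
-- def _yahtzee_parse_category(text: str) -> Optional[str]:
--     parts = text.split(None, 1)
--     if len(parts) < 2:
--         return None
--     raw = parts[1].strip().lower()
--     normalized = raw.replace(" ", "_")
--     for category in YAHTZEE_CATEGORIES:
--         if normalized == category:
--             return category
--     for category in YAHTZEE_CATEGORIES: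
--         label = YAHTZEE_LABELS[category].lower().replace(" ", "_")
--         if normalized == label:
--             return category
--     return None
-- ===== SOURCE B (Python) =====
-- from typing import Optional
--
-- # Sorted alias table (alias -> category): the 13 canonical keys plus the two
-- # label spellings that differ from their key; kept sorted for binary search.
-- _ALIASES = [
--     ("chance", "chance"),
--     ("fives", "fives"),
--     ("four_kind", "four_kind"),
--     ("four_of_a_kind", "four_kind"),
--     ("fours", "fours"),
--     ("full_house", "full_house"),
--     ("large_straight", "large_straight"),
--     ("ones", "ones"),
--     ("sixes", "sixes"),
--     ("small_straight", "small_straight"),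
--     ("three_kind", "three_kind"),
--     ("three_of_a_kind", "three_kind"),
--     ("threes", "threes"),
--     ("twos", "twos"),
--     ("yahtzee", "yahtzee"),
-- ]
--
--
-- def _yahtzee_parse_category(text: str) -> Optional[str]:
--     parts = text.split(None, 1)
--     if len(parts) < 2:
--         return None
--     key = parts[1].strip().lower().replace(" ", "_")
--     lo, hi = 0, len(_ALIASES)
--     while lo < hi:
--         mid = (lo + hi) // 2
--         alias, category = _ALIASES[mid]
--         if alias == key:
--             return category
--         if alias < key:
--             lo = mid + 1
--         else:
--             hi = mid
--     return None
-- ===== Notes on version B (the rewrite author's own statement) =====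
-- stated objective: alternative
-- what changed: Replaces A's two sequential linear scans (over categories, then over lowered/underscored labels) with binary search over one precomputed sorted alias table.
import Mathlib
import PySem

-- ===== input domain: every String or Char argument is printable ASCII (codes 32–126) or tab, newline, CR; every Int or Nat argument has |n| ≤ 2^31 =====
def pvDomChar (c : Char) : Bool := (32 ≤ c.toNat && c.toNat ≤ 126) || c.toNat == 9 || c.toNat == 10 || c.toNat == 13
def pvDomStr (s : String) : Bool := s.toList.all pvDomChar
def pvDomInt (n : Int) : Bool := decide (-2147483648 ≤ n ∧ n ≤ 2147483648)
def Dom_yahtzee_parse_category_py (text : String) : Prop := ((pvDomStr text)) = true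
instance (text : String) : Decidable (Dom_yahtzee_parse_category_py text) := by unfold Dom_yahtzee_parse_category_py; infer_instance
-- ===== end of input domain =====

-- B replaces A's two sequential linear scans with binary search over one precomputed sorted alias table (objective: alternative algorithm).

-- ===== PORT A =====
def yahtzeeCategories : List String :=
  ["ones", "twos", "threes", "fours", "fives", "sixes", "three_kind", "four_kind",
   "full_house", "small_straight", "large_straight", "chance", "yahtzee"]

def yahtzeeLabels : PySem.Dict String String :=
  PySem.Dict.ofList
    [("ones", "Ones"), ("twos", "Twos"), ("threes", "Threes"), ("fours", "Fours"),
     ("fives", "Fives"), ("sixes", "Sixes"), ("three_kind", "Three of a Kind"),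
     ("four_kind", "Four of a Kind"), ("full_house", "Full House"),
     ("small_straight", "Small Straight"), ("large_straight", "Large Straight"),
     ("chance", "Chance"), ("yahtzee", "Yahtzee")]

-- YAHTZEE_LABELS[category]: every category is a key, so the KeyError branch is unreachable; getD "" is exact here
def yahtzee_parse_category_py (text : String) : Option String :=
  let parts := PySem.Str.split₀Max text 1
  if parts.length < 2 then none
  else
    let raw := PySem.Str.lower (PySem.Str.strip (parts.getD 1 ""))
    let normalized := PySem.Str.replace raw " " "_"
    match yahtzeeCategories.find? (fun category => normalized == category) with
    | some category => some category
    | none =>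
        yahtzeeCategories.find? (fun category =>
          normalized == PySem.Str.replace (PySem.Str.lower (yahtzeeLabels.getD category "")) " " "_")

-- ===== PORT B =====
-- the literal sorted table _ALIASES from Source B
def yahtzeeAliases : List (String × String) :=
  [("chance", "chance"), ("fives", "fives"), ("four_kind", "four_kind"),
   ("four_of_a_kind", "four_kind"), ("fours", "fours"), ("full_house", "full_house"),
   ("large_straight", "large_straight"), ("ones", "ones"), ("sixes", "sixes"),
   ("small_straight", "small_straight"), ("three_kind", "three_kind"),
   ("three_of_a_kind", "three_kind"), ("threes", "threes"), ("twos", "twos"),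
   ("yahtzee", "yahtzee")]

-- Source B's while loop, ported with a fuel counter; hi - lo strictly decreases each
-- iteration, so fuel = len(_ALIASES) + 1 never runs out and the port is exact.
-- _ALIASES[mid]: lo ≤ mid < hi ≤ len at every call, so IndexError is unreachable; getD is exact here.
-- lo, hi, mid are Python ints that stay ≥ 0, so Nat with `(lo+hi)/2` is exact for `(lo+hi)//2`.
-- Python's `<` on str is code-point lexicographic = Lean's `<` on toList (PySem.Chars.strLt).
def yahtzeeBinSearch (key : String) (fuel lo hi : Nat) : Option String :=
  match fuel with
  | 0 => none
  | fuel + 1 =>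
    if lo < hi then
      let mid := (lo + hi) / 2
      let p := yahtzeeAliases.getD mid ("", "")
      if p.1 == key then some p.2
      else if PySem.Chars.strLt p.1.toList key.toList then yahtzeeBinSearch key fuel (mid + 1) hi
      else yahtzeeBinSearch key fuel lo mid
    else none

def yahtzee_parse_category_py_alt (text : String) : Option String :=
  let parts := PySem.Str.split₀Max text 1
  if parts.length < 2 then none
  else
    let key := PySem.Str.replace (PySem.Str.lower (PySem.Str.strip (parts.getD 1 ""))) " " "_"
    yahtzeeBinSearch key (yahtzeeAliases.length + 1) 0 yahtzeeAliases.length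

-- ===== PRECONDITION & SPEC =====
def Spec_yahtzee_parse_category_py (text : String) (out : Option String) : Prop := out = yahtzee_parse_category_py_alt text
instance (text : String) (out : Option String) : Decidable (Spec_yahtzee_parse_category_py text out) := by unfold Spec_yahtzee_parse_category_py; infer_instance

-- ===== CLAIM (what is proved, stated in full; the proofs are below) =====
def Claim_equal_yahtzee_parse_category_py : Prop := ∀ (text : String), Dom_yahtzee_parse_category_py text → Spec_yahtzee_parse_category_py text (yahtzee_parse_category_py text)

-- ===== LEMMAS AND PROOFS =====
set_option maxRecDepth 8192

-- binary search only answers through the `alias == key` guard: if no table entry's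
-- alias (nor the unreachable default "") equals the key, every run returns none
lemma yahtzeeBinSearch_none (key : String) (hk : ("" == key) = false)
    (h : ∀ p ∈ yahtzeeAliases, (p.1 == key) = false) :
    ∀ fuel lo hi, yahtzeeBinSearch key fuel lo hi = none := by
  intro fuel
  induction fuel with
  | zero => intro lo hi; rfl
  | succ n ih =>
    intro lo hi
    unfold yahtzeeBinSearch
    by_cases hlt : lo < hi
    · simp only [if_pos hlt]
      have hb : ((yahtzeeAliases.getD ((lo + hi) / 2) ("", "")).1 == key) = false := by
        by_cases hm : (lo + hi) / 2 < yahtzeeAliases.length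
        · have hget : yahtzeeAliases.getD ((lo + hi) / 2) ("", "") = yahtzeeAliases[(lo + hi) / 2] := by
            simp [List.getD_eq_getElem?_getD, List.getElem?_eq_getElem hm]
          rw [hget]
          exact h _ (List.getElem_mem hm)
        · have hle : yahtzeeAliases.length ≤ (lo + hi) / 2 := by omega
          have hget : yahtzeeAliases.getD ((lo + hi) / 2) ("", "") = ("", "") := by
            simp [List.getD_eq_getElem?_getD, List.getElem?_eq_none hle]
          rw [hget]; exact hk
      simp only [hb, Bool.false_eq_true, if_false]
      by_cases hc : PySem.Chars.strLt (yahtzeeAliases.getD ((lo + hi) / 2) ("", "")).1.toList key.toList = true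
      · rw [if_pos hc]; exact ih _ _
      · rw [if_neg (by simpa using hc)]; exact ih _ _
    · simp only [if_neg hlt]

lemma lab1 : PySem.Str.replace (PySem.Str.lower (yahtzeeLabels.getD "ones" "")) " " "_" = "ones" := by rfl
lemma lab2 : PySem.Str.replace (PySem.Str.lower (yahtzeeLabels.getD "twos" "")) " " "_" = "twos" := by rfl
lemma lab3 : PySem.Str.replace (PySem.Str.lower (yahtzeeLabels.getD "threes" "")) " " "_" = "threes" := by rfl
lemma lab4 : PySem.Str.replace (PySem.Str.lower (yahtzeeLabels.getD "fours" "")) " " "_" = "fours" := by rfl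
lemma lab5 : PySem.Str.replace (PySem.Str.lower (yahtzeeLabels.getD "fives" "")) " " "_" = "fives" := by rfl
lemma lab6 : PySem.Str.replace (PySem.Str.lower (yahtzeeLabels.getD "sixes" "")) " " "_" = "sixes" := by rfl
lemma lab7 : PySem.Str.replace (PySem.Str.lower (yahtzeeLabels.getD "three_kind" "")) " " "_" = "three_of_a_kind" := by rfl
lemma lab8 : PySem.Str.replace (PySem.Str.lower (yahtzeeLabels.getD "four_kind" "")) " " "_" = "four_of_a_kind" := by rfl
lemma lab9 : PySem.Str.replace (PySem.Str.lower (yahtzeeLabels.getD "full_house" "")) " " "_" = "full_house" := by rfl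
lemma lab10 : PySem.Str.replace (PySem.Str.lower (yahtzeeLabels.getD "small_straight" "")) " " "_" = "small_straight" := by rfl
lemma lab11 : PySem.Str.replace (PySem.Str.lower (yahtzeeLabels.getD "large_straight" "")) " " "_" = "large_straight" := by rfl
lemma lab12 : PySem.Str.replace (PySem.Str.lower (yahtzeeLabels.getD "chance" "")) " " "_" = "chance" := by rfl
lemma lab13 : PySem.Str.replace (PySem.Str.lower (yahtzeeLabels.getD "yahtzee" "")) " " "_" = "yahtzee" := by rfl

-- pointwise agreement of A's two scans with B's binary search, for an arbitrary normalized string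
lemma yahtzee_core_eq (s : String) :
    (match yahtzeeCategories.find? (fun category => s == category) with
     | some category => some category
     | none =>
         yahtzeeCategories.find? (fun category =>
           s == PySem.Str.replace (PySem.Str.lower (yahtzeeLabels.getD category "")) " " "_"))
    = yahtzeeBinSearch s (yahtzeeAliases.length + 1) 0 yahtzeeAliases.length := by
  by_cases h0 : s = ""; · subst h0; decide
  by_cases h1 : s = "ones"; · subst h1; decide
  by_cases h2 : s = "twos"; · subst h2; decide
  by_cases h3 : s = "threes"; · subst h3; decide
  by_cases h4 : s = "fours"; · subst h4; decide
  by_cases h5 : s = "fives"; · subst h5; decide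
  by_cases h6 : s = "sixes"; · subst h6; decide
  by_cases h7 : s = "three_kind"; · subst h7; decide
  by_cases h8 : s = "four_kind"; · subst h8; decide
  by_cases h9 : s = "full_house"; · subst h9; decide
  by_cases h10 : s = "small_straight"; · subst h10; decide
  by_cases h11 : s = "large_straight"; · subst h11; decide
  by_cases h12 : s = "chance"; · subst h12; decide
  by_cases h13 : s = "yahtzee"; · subst h13; decide
  by_cases h14 : s = "three_of_a_kind"; · subst h14; decide
  by_cases h15 : s = "four_of_a_kind"; · subst h15; decide
  -- s matches no alias: A's two scans and B's search all return none
  have b1 : (s == "ones") = false := beq_eq_false_iff_ne.mpr h1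
  have b2 : (s == "twos") = false := beq_eq_false_iff_ne.mpr h2
  have b3 : (s == "threes") = false := beq_eq_false_iff_ne.mpr h3
  have b4 : (s == "fours") = false := beq_eq_false_iff_ne.mpr h4
  have b5 : (s == "fives") = false := beq_eq_false_iff_ne.mpr h5
  have b6 : (s == "sixes") = false := beq_eq_false_iff_ne.mpr h6
  have b7 : (s == "three_kind") = false := beq_eq_false_iff_ne.mpr h7
  have b8 : (s == "four_kind") = false := beq_eq_false_iff_ne.mpr h8
  have b9 : (s == "full_house") = false := beq_eq_false_iff_ne.mpr h9
  have b10 : (s == "small_straight") = false := beq_eq_false_iff_ne.mpr h10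
  have b11 : (s == "large_straight") = false := beq_eq_false_iff_ne.mpr h11
  have b12 : (s == "chance") = false := beq_eq_false_iff_ne.mpr h12
  have b13 : (s == "yahtzee") = false := beq_eq_false_iff_ne.mpr h13
  have b14 : (s == "three_of_a_kind") = false := beq_eq_false_iff_ne.mpr h14
  have b15 : (s == "four_of_a_kind") = false := beq_eq_false_iff_ne.mpr h15
  rw [yahtzeeBinSearch_none s (beq_eq_false_iff_ne.mpr (Ne.symm h0))
    (by
      intro p hp
      simp only [yahtzeeAliases, List.mem_cons, List.not_mem_nil, or_false] at hp
      rcases hp with h|h|h|h|h|h|h|h|h|h|h|h|h|h|h <;> subst h <;>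
        exact beq_eq_false_iff_ne.mpr (by intro he; subst he; simp_all))]
  simp only [yahtzeeCategories, List.find?, lab1, lab2, lab3, lab4, lab5, lab6, lab7, lab8,
    lab9, lab10, lab11, lab12, lab13, b1, b2, b3, b4, b5, b6, b7, b8, b9, b10, b11,
    b12, b13, b14, b15]

-- ===== VERDICT (by name: the statement is the Claim_ definition above) =====
theorem yahtzee_parse_category_py_spec : Claim_equal_yahtzee_parse_category_py := by
  intro text _
  show yahtzee_parse_category_py text = yahtzee_parse_category_py_alt text
  unfold yahtzee_parse_category_py yahtzee_parse_category_py_alt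
  by_cases h : (PySem.Str.split₀Max text 1).length < 2
  · simp only [if_pos h]
  · simp only [if_neg h]
    generalize (PySem.Str.replace (PySem.Str.lower (PySem.Str.strip ((PySem.Str.split₀Max text 1).getD 1 ""))) " " "_") = s
    exact yahtzee_core_eq s
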